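-- pv_equiv track=rewrite | github.com/Cuuuurry/unnitest-practice | binary string.py | binary_strings
-- ===== SOURCE A (Python) =====
-- from typing import Generator
--
-- def binary_strings(string: str) -> Generator[str, None, None]:
--     if not string:
--         yield ""
--     else:
--         for subString in binary_strings(string[:-1]):
--             alphabet = string[-1]
--             if alphabet != "X":
--                 yield subString + alphabet
--             else:
--                 for digit in ["0", "1"]:
--                     yield subString + digit
-- ===== SOURCE B (Python) =====
-- def binary_strings(string):
--     idxs = [i for i, c in enumerate(string) if c == "X"]
--     for n in range(2 ** len(idxs)):
--         chars = list(string)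
--         m = n
--         for i in reversed(idxs):
--             chars[i] = "1" if m % 2 else "0"
--             m //= 2
--         yield "".join(chars)
-- ===== Notes on version B (the rewrite author's own statement) =====
-- stated objective: faster
-- what changed: Replaces A's per-character generator recursion (each output string is assembled by concatenation through a chain of n nested generators) with collecting the X positions once and counting an integer n from 0 to 2^k-1 whose binary digits (most significant bit at the leftmost X) overwrite the X slots of a copied template, yielding the same strings in the same order.
import Mathlib
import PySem

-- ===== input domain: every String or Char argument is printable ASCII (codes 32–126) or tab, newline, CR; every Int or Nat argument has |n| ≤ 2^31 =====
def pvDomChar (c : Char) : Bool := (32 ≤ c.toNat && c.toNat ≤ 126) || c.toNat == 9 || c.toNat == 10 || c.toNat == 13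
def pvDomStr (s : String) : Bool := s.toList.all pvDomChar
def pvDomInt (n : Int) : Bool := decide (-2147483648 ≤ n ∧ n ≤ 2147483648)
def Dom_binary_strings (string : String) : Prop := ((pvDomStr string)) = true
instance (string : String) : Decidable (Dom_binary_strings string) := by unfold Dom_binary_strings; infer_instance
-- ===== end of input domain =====

-- B replaces A's per-character recursion by collecting the X positions once and counting an
-- integer whose binary digits fill them (alternative algorithm, same values in the same order).

-- ===== PORT A =====
-- A recurses on string[:-1] and inspects string[-1]; transcribed as structural recursion
-- on the reversed character list (head of the reversed list = string[-1]).
def binary_strings_go : List Char → List String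
  | [] => [""]
  | c :: rest =>
    (binary_strings_go rest).flatMap (fun subString =>
      if c ≠ 'X' then [subString.push c]
      else [subString.push '0', subString.push '1'])

def binary_strings (string : String) : List String :=
  binary_strings_go string.toList.reverse

-- ===== PORT B =====
-- one step of B's inner loop: chars[i] = "1" if m % 2 else "0"; m //= 2
def bsAltStep (st : List Char × Int) (i : Int) : List Char × Int :=
  (PySem.List.pySetD st.1 i (if PySem.Int.mod st.2 2 ≠ 0 then '1' else '0'),
   PySem.Int.floordiv st.2 2)

-- idxs = [i for i, c in enumerate(string) if c == "X"]
def bsAltIdxs (cs : List Char) : List Int :=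
  ((PySem.List.enumerate cs 0).filter (fun p => p.2 == 'X')).map (fun p => p.1)

-- the body of B's outer loop for one n ("".join at the end = String.mk)
def bsAltAssign (cs : List Char) (idxs : List Int) (n : Int) : List Char :=
  (idxs.reverse.foldl bsAltStep (cs, n)).1

def binary_strings_alt (string : String) : List String :=
  let cs := string.toList
  let idxs := bsAltIdxs cs
  (PySem.List.pyRange 0 (2 ^ idxs.length) 1).map
    (fun n => String.mk (bsAltAssign cs idxs n))

-- ===== PRECONDITION & SPEC =====
def Spec_binary_strings (string : String) (out : List String) : Prop := out = binary_strings_alt string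
instance (string : String) (out : List String) : Decidable (Spec_binary_strings string out) := by unfold Spec_binary_strings; infer_instance

-- ===== CLAIM (what is proved, stated in full; the proofs are below) =====
def Claim_equal_binary_strings : Prop := ∀ (string : String), Dom_binary_strings string → Spec_binary_strings string (binary_strings string)

-- ===== LEMMAS AND PROOFS =====

-- canonical expansion, front-to-back (earlier positions vary slower)
def expandBS : List Char → List (List Char)
  | [] => [[]]
  | c :: rest =>
    if c = 'X' then (expandBS rest).map ('0' :: ·) ++ (expandBS rest).map ('1' :: ·)
    else (expandBS rest).map (c :: ·)

theorem expand_append_singleton (c : Char) (ds : List Char) :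
    expandBS (ds ++ [c]) =
      (expandBS ds).flatMap (fun l =>
        if c ≠ 'X' then [l ++ [c]] else [l ++ ['0'], l ++ ['1']]) := by
  induction ds with
  | nil => by_cases h : c = 'X' <;> simp [expandBS, h]
  | cons d ds ih =>
    by_cases hc : c = 'X' <;> simp only [hc] at ih ⊢ <;> simp at ih <;>
      by_cases hd : d = 'X' <;>
        simp [expandBS, hd, hc, ih, List.flatMap_append, List.flatMap_map, List.map_flatMap]

theorem goA_eq (cs : List Char) :
    binary_strings_go cs.reverse = (expandBS cs).map (fun l => String.mk l) := by
  induction cs using List.reverseRecOn with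
  | nil =>
    simp only [List.reverse_nil, binary_strings_go, expandBS, List.map]
    decide
  | append_singleton ds c ih =>
    rw [List.reverse_append]
    simp only [List.reverse_singleton, List.singleton_append, binary_strings_go, ih,
      expand_append_singleton]
    rw [List.flatMap_map, List.map_flatMap]
    apply List.flatMap_congr
    intro l _
    by_cases hc : c = 'X' <;> simp [hc, String.push, String.mk]

theorem enumerate_shift (cs : List Char) : ∀ s : Int,
    PySem.List.enumerate cs s = (PySem.List.enumerate cs 0).map (fun p => (p.1 + s, p.2)) := by
  induction cs with
  | nil => intro s; simp [PySem.List.enumerate_nil]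
  | cons c cs ih =>
    intro s
    rw [PySem.List.enumerate_cons, PySem.List.enumerate_cons, ih (s + 1)]
    simp only [zero_add]
    rw [ih 1, List.map_cons, List.map_map]
    refine congrArg₂ _ (by simp) ?_
    apply List.map_congr_left
    intro p _
    dsimp [Function.comp]
    congr 1
    ring

theorem idxs_cons (c : Char) (rest : List Char) :
    bsAltIdxs (c :: rest) =
      if c = 'X' then (0 : Int) :: (bsAltIdxs rest).map (· + 1)
      else (bsAltIdxs rest).map (· + 1) := by
  unfold bsAltIdxs
  rw [PySem.List.enumerate_cons]
  simp only [zero_add]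
  rw [enumerate_shift rest 1]
  by_cases hc : c = 'X' <;>
    simp [hc, List.filter_map, List.map_map, Function.comp_def]

theorem idxs_nonneg (cs : List Char) : ∀ i ∈ bsAltIdxs cs, 0 ≤ i := by
  induction cs with
  | nil => simp [bsAltIdxs, PySem.List.enumerate_nil]
  | cons c rest ih =>
    intro i hi
    rw [idxs_cons] at hi
    by_cases hc : c = 'X'
    · rw [if_pos hc] at hi
      rcases List.mem_cons.mp hi with h0 | hm
      · omega
      · obtain ⟨j, hj, rfl⟩ := List.mem_map.mp hm
        have := ih j hj; omega
    · rw [if_neg hc] at hi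
      obtain ⟨j, hj, rfl⟩ := List.mem_map.mp hi
      have := ih j hj; omega

theorem set_cons_succ (c : Char) (cs : List Char) (n : Nat) (v : Char) :
    (c :: cs).set (n + 1) v = c :: cs.set n v := rfl

theorem foldl_step_shift (rl : List Int) (h : ∀ i ∈ rl, 0 ≤ i) :
    ∀ (c : Char) (cs : List Char) (m : Int),
      (rl.map (· + 1)).foldl bsAltStep (c :: cs, m) =
        ((c :: (rl.foldl bsAltStep (cs, m)).1), (rl.foldl bsAltStep (cs, m)).2) := by
  induction rl with
  | nil => intro c cs m; simp
  | cons i rl ih =>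
    intro c cs m
    have hi : 0 ≤ i := h i (List.mem_cons_self ..)
    have hstep : bsAltStep (c :: cs, m) (i + 1) =
        (c :: (bsAltStep (cs, m) i).1, (bsAltStep (cs, m) i).2) := by
      unfold bsAltStep
      rw [PySem.List.pySetD_of_nonneg _ _ (by omega : (0:Int) ≤ i + 1),
        PySem.List.pySetD_of_nonneg _ _ hi]
      have ht : (i + 1).toNat = i.toNat + 1 := by omega
      rw [ht, set_cons_succ]
    simp only [List.map_cons, List.foldl_cons, hstep]
    exact ih (fun j hj => h j (List.mem_cons_of_mem _ hj)) c _ _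

theorem foldl_step_bits (rl : List Int) :
    ∀ (cs : List Char) (b m : Int), 0 ≤ m → m < 2 ^ rl.length →
      rl.foldl bsAltStep (cs, b * 2 ^ rl.length + m) =
        ((rl.foldl bsAltStep (cs, m)).1, b) := by
  induction rl with
  | nil =>
    intro cs b m h0 h1
    simp only [List.length_nil, pow_zero] at h1
    have : m = 0 := by omega
    simp [this]
  | cons i rl ih =>
    intro cs b m h0 h1
    have hlen : (2 : Int) ^ (i :: rl).length = 2 ^ rl.length * 2 := by simp [pow_succ]
    have hK : (0 : Int) < 2 ^ rl.length := by positivity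
    have hm1 : m < 2 ^ rl.length * 2 := by rw [hlen] at h1; exact h1
    have key : b * 2 ^ (i :: rl).length + m = (b * 2 ^ rl.length) * 2 + m := by rw [hlen]; ring
    have hmod : PySem.Int.mod (b * 2 ^ (i :: rl).length + m) 2 = PySem.Int.mod m 2 := by
      rw [PySem.Int.mod_eq_emod_of_pos (by norm_num), PySem.Int.mod_eq_emod_of_pos (by norm_num),
        key]
      omega
    have hdiv : PySem.Int.floordiv (b * 2 ^ (i :: rl).length + m) 2 =
        b * 2 ^ rl.length + PySem.Int.floordiv m 2 := by
      rw [PySem.Int.floordiv_eq_ediv_of_pos (by norm_num),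
        PySem.Int.floordiv_eq_ediv_of_pos (by norm_num), key]
      omega
    have hm2 : PySem.Int.floordiv m 2 = m / 2 := PySem.Int.floordiv_eq_ediv_of_pos (by norm_num)
    have hstep : bsAltStep (cs, b * 2 ^ (i :: rl).length + m) i =
        ((bsAltStep (cs, m) i).1, b * 2 ^ rl.length + PySem.Int.floordiv m 2) := by
      unfold bsAltStep
      rw [hmod, hdiv]
    simp only [List.foldl_cons, hstep]
    have h2 := ih (bsAltStep (cs, m) i).1 b (PySem.Int.floordiv m 2)
      (by rw [hm2]; omega) (by rw [hm2]; omega)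
    rw [h2]
    have : bsAltStep (cs, m) i = ((bsAltStep (cs, m) i).1, PySem.Int.floordiv m 2) := by
      unfold bsAltStep; rfl
    rw [← this]

theorem assign_noX (c : Char) (rest : List Char) (n : Int) :
    bsAltAssign (c :: rest) ((bsAltIdxs rest).map (· + 1)) n =
      c :: bsAltAssign rest (bsAltIdxs rest) n := by
  unfold bsAltAssign
  rw [← List.map_reverse, foldl_step_shift _
    (fun i hi => idxs_nonneg rest i (List.mem_reverse.mp hi))]

theorem assign_X (c : Char) (rest : List Char) (b m : Int) (h0 : 0 ≤ m)
    (h1 : m < 2 ^ (bsAltIdxs rest).length) :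
    bsAltAssign (c :: rest) ((0 : Int) :: (bsAltIdxs rest).map (· + 1))
        (b * 2 ^ (bsAltIdxs rest).length + m) =
      (if PySem.Int.mod b 2 ≠ 0 then '1' else '0') :: bsAltAssign rest (bsAltIdxs rest) m := by
  unfold bsAltAssign
  rw [List.reverse_cons, ← List.map_reverse, List.foldl_append, foldl_step_shift _
    (fun i hi => idxs_nonneg rest i (List.mem_reverse.mp hi))]
  have hb := foldl_step_bits ((bsAltIdxs rest).reverse) rest b m h0
    (by rwa [List.length_reverse])
  rw [List.length_reverse] at hb
  rw [hb]
  simp only [List.foldl_cons, List.foldl_nil, bsAltStep]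
  rw [PySem.List.pySetD_of_nonneg _ _ le_rfl]
  rfl

theorem pyRange_pow (k : Nat) :
    PySem.List.pyRange 0 (2 ^ k) 1 = (List.range (2 ^ k)).map (fun j : Nat => (j : Int)) := by
  rw [PySem.List.pyRange_one]
  have h2 : ((2 : Int) ^ k - 0).toNat = 2 ^ k := by
    have : ((2 : Int) ^ k) = ((2 ^ k : Nat) : Int) := by push_cast; ring
    rw [sub_zero, this, Int.toNat_natCast]
  rw [h2]
  apply List.map_congr_left
  intro j _
  simp

theorem altB_eq (cs : List Char) :
    (PySem.List.pyRange 0 (2 ^ (bsAltIdxs cs).length) 1).map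
        (fun n => bsAltAssign cs (bsAltIdxs cs) n) = expandBS cs := by
  induction cs with
  | nil => decide
  | cons c rest ih =>
    rw [idxs_cons]
    rw [pyRange_pow, List.map_map] at ih
    by_cases hc : c = 'X'
    · rw [if_pos hc]
      have hlen : ((0 : Int) :: (bsAltIdxs rest).map (· + 1)).length =
          (bsAltIdxs rest).length + 1 := by simp
      have hsplit : (2 : Nat) ^ ((bsAltIdxs rest).length + 1) =
          2 ^ (bsAltIdxs rest).length + 2 ^ (bsAltIdxs rest).length := by
        rw [pow_succ]; ring
      rw [hlen, pyRange_pow, List.map_map, hsplit, List.range_add, List.map_append,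
        List.map_map]
      have e : expandBS (c :: rest) =
          (expandBS rest).map ('0' :: ·) ++ (expandBS rest).map ('1' :: ·) := by
        simp [expandBS, hc]
      rw [e, ← ih, List.map_map, List.map_map]
      have hcast : ∀ j : Nat, j ∈ List.range (2 ^ (bsAltIdxs rest).length) →
          (0 : Int) ≤ (j : Int) ∧ (j : Int) < 2 ^ (bsAltIdxs rest).length := by
        intro j hj
        have hj' := List.mem_range.mp hj
        constructor
        · positivity
        · have h1 : ((j : Int)) < ((2 ^ (bsAltIdxs rest).length : Nat) : Int) := by
            exact_mod_cast hj'
          have h2 : ((2 ^ (bsAltIdxs rest).length : Nat) : Int) =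
              2 ^ (bsAltIdxs rest).length := by push_cast; ring
          rw [h2] at h1; exact h1
      congr 1
      · apply List.map_congr_left
        intro j hj
        obtain ⟨hj0, hj1⟩ := hcast j hj
        dsimp [Function.comp]
        have := assign_X c rest 0 (j : Int) hj0 hj1
        rw [zero_mul, zero_add] at this
        rw [this]
        norm_num
      · apply List.map_congr_left
        intro j hj
        obtain ⟨hj0, hj1⟩ := hcast j hj
        dsimp [Function.comp]
        have harg : ((2 : Int) ^ (bsAltIdxs rest).length + (j : Int)) =
            1 * 2 ^ (bsAltIdxs rest).length + (j : Int) := by ring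
        rw [harg, assign_X c rest 1 (j : Int) hj0 hj1]
        norm_num
    · rw [if_neg hc]
      have hlen : ((bsAltIdxs rest).map (· + 1)).length = (bsAltIdxs rest).length := by simp
      rw [hlen, pyRange_pow, List.map_map]
      have e : expandBS (c :: rest) = (expandBS rest).map (c :: ·) := by
        simp [expandBS, hc]
      rw [e, ← ih, List.map_map]
      apply List.map_congr_left
      intro j _
      dsimp [Function.comp]
      rw [assign_noX]

-- ===== VERDICT (by name: the statement is the Claim_ definition above) =====
theorem binary_strings_spec : Claim_equal_binary_strings := by
  intro s _
  unfold Spec_binary_strings binary_strings binary_strings_alt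
  rw [goA_eq]
  have h := altB_eq s.toList
  calc (expandBS s.toList).map (fun l => String.mk l)
      = ((PySem.List.pyRange 0 (2 ^ (bsAltIdxs s.toList).length) 1).map
          (fun n => bsAltAssign s.toList (bsAltIdxs s.toList) n)).map (fun l => String.mk l) := by
        rw [h]
    _ = _ := by rw [List.map_map]; rfl
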